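-- pv_equiv track=rewrite | github.com/IIT25/algorithms_in_bioinformatics_project1 | alignment_utils.py | expand_sequence
-- ===== SOURCE A (Python) =====
-- from itertools import product
--
-- def expand_sequence(sequence: str, alphabet: list, ambiguous_map: dict):
--     """
--     Function to generate all possible sequences from unresolved characters
--     (This is doable under this problem because we only have around 8 unknown characters
--     But otherwise it would increase untractabilly)
--
--     Recieves:
--     - sequence: Sequence to expand
--     - alphabet: List of elements in the considered alphabet
--     - ambiguous_map: Dictionary defining how to go about the non resolved characters
--     """
--     alphabet_set = set(alphabet)
--
--     # Build list of options per position
--     options_per_position = []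
--
--     for char in sequence:
--         if char in alphabet_set:
--             options_per_position.append([char])
--         elif char in ambiguous_map:
--             options_per_position.append(ambiguous_map[char])
--         else:
--             raise Exception(f"Invalid character found: {char}")
--
--     # Generate all combinations
--     all_combinations = list(product(*options_per_position))
--
--     # Convert tuples to strings
--     expanded_sequences = ["".join(comb) for comb in all_combinations]
--
--     return expanded_sequences
-- ===== SOURCE B (Python) =====
-- def _char_options(char, alphabet_set, ambiguous_map):
--     if char in alphabet_set:
--         return [char]
--     if char in ambiguous_map:
--         return ambiguous_map[char]
--     raise Exception(f"Invalid character found: {char}")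
--
--
-- def expand_sequence(sequence: str, alphabet: list, ambiguous_map: dict):
--     """Expand ambiguous characters: one left-to-right pass growing an
--     accumulator of prefixes instead of building an options table and
--     calling itertools.product."""
--     alphabet_set = set(alphabet)
--     results = [""]
--     for char in sequence:
--         options = _char_options(char, alphabet_set, ambiguous_map)
--         results = [prefix + ch for prefix in results for ch in options]
--     return results
-- ===== Notes on version B (the rewrite author's own statement) =====
-- stated objective: simpler
-- what changed: Replaced the two-phase build (options table per position, itertools.product, tuple-join pass) with a single left-to-right pass that grows an accumulator of prefix strings, extending each prefix by the current character's options.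
import Mathlib
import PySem

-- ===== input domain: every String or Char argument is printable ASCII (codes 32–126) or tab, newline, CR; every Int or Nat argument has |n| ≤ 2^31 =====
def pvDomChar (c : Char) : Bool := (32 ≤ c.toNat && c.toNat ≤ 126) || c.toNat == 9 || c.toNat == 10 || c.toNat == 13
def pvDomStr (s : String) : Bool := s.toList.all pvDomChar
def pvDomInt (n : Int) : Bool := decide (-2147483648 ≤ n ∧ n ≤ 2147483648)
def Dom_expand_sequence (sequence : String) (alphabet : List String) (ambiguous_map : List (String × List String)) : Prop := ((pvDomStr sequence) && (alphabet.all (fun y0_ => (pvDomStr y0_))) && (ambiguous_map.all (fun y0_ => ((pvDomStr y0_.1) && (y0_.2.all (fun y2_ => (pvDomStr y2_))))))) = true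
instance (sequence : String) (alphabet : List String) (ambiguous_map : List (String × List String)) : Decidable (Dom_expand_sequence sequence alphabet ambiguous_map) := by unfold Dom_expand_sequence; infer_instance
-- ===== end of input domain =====

-- B replaces the options-table + itertools.product + join pipeline with a single
-- left-to-right pass that grows an accumulator of prefix strings (objective: simpler).

-- ===== PORT A =====
-- itertools.product(*options), odometer order (last position varies fastest)
def pyProductA (os : List (List String)) : List (List String) :=
  os.foldr (fun opt acc => opt.flatMap (fun x => acc.map (fun comb => x :: comb))) [[]]

def expand_sequence (sequence : String) (alphabet : List String) (ambiguous_map : List (String × List String)) : List String :=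
  let alphabet_set := PySem.Set.ofList alphabet
  let options_per_position := sequence.toList.map (fun char =>
    let cs := String.singleton char
    if cs ∈ alphabet_set then [cs]
    else match (PySem.Dict.mk ambiguous_map).get? cs with
      | some v => v
      | none => [])  -- Python raises Exception here; such inputs are outside Pre_
  let all_combinations := pyProductA options_per_position
  all_combinations.map (fun comb => PySem.Str.join "" comb)

-- ===== PORT B =====
-- helper _char_options of Source B ([] stands in for the raise, outside Pre_)
def altCharOptions (char : Char) (alphabet_set : PySem.Set String) (ambiguous_map : List (String × List String)) : List String :=
  let cs := String.singleton char
  if cs ∈ alphabet_set then [cs]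
  else match (PySem.Dict.mk ambiguous_map).get? cs with
    | some v => v
    | none => []

def expand_sequence_alt (sequence : String) (alphabet : List String) (ambiguous_map : List (String × List String)) : List String :=
  let alphabet_set := PySem.Set.ofList alphabet
  sequence.toList.foldl (fun results char =>
    results.flatMap (fun pre =>
      (altCharOptions char alphabet_set ambiguous_map).map (fun ch => pre ++ ch))) [""]

-- ===== PRECONDITION & SPEC =====
-- Pre_ excludes exactly the inputs where some character of the sequence is neither in the
-- alphabet nor a key of the ambiguous map: there the Python A raises Exception.
def Pre_expand_sequence (sequence : String) (alphabet : List String) (ambiguous_map : List (String × List String)) : Prop :=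
  (sequence.toList.all (fun c =>
    alphabet.contains (String.singleton c)
      || ((PySem.Dict.mk ambiguous_map).get? (String.singleton c)).isSome)) = true

instance (sequence : String) (alphabet : List String) (ambiguous_map : List (String × List String)) : Decidable (Pre_expand_sequence sequence alphabet ambiguous_map) := by unfold Pre_expand_sequence; infer_instance

def pvWitness_expand_sequence : String × List String × (List (String × List String)) :=
  ("acN", ["a", "c"], [("N", ["a", "c"])])

def Spec_expand_sequence (sequence : String) (alphabet : List String) (ambiguous_map : List (String × List String)) (out : List String) : Prop := out = expand_sequence_alt sequence alphabet ambiguous_map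
instance (sequence : String) (alphabet : List String) (ambiguous_map : List (String × List String)) (out : List String) : Decidable (Spec_expand_sequence sequence alphabet ambiguous_map out) := by unfold Spec_expand_sequence; infer_instance

-- ===== CLAIM (what is proved, stated in full; the proofs are below) =====
def Claim_equal_expand_sequence : Prop := ∀ (sequence : String) (alphabet : List String) (ambiguous_map : List (String × List String)), Dom_expand_sequence sequence alphabet ambiguous_map → Pre_expand_sequence sequence alphabet ambiguous_map → Spec_expand_sequence sequence alphabet ambiguous_map (expand_sequence sequence alphabet ambiguous_map)

-- ===== LEMMAS AND PROOFS =====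

theorem join_empty_nil : PySem.Str.join "" [] = "" := by
  apply String.toList_injective
  simp [PySem.Str.toList_join, PySem.Chars.join, List.intercalate]

theorem join_empty_cons (x : String) (xs : List String) :
    PySem.Str.join "" (x :: xs) = x ++ PySem.Str.join "" xs := by
  apply String.toList_injective
  cases xs <;> simp [PySem.Str.toList_join, PySem.Chars.join, List.intercalate]

-- B's accumulator loop computes every prefix extended by every full combination of the rest
theorem foldl_step_eq (f : Char → List String) (l : List Char) :
    ∀ res : List String,
      l.foldl (fun results char =>
        results.flatMap (fun p => (f char).map (fun ch => p ++ ch))) res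
      = res.flatMap (fun p => (pyProductA (l.map f)).map (fun comb => p ++ PySem.Str.join "" comb)) := by
  induction l with
  | nil =>
      intro res
      simp [pyProductA, join_empty_nil]
  | cons c l ih =>
      intro res
      simp only [List.foldl_cons, List.map_cons, ih]
      simp only [pyProductA, List.foldr_cons]
      rw [List.flatMap_assoc]
      refine List.flatMap_congr fun p _ => ?_
      simp only [List.flatMap_map, List.map_flatMap, List.map_map, Function.comp_def]
      simp [join_empty_cons, String.append_assoc]

theorem expand_sequence_eq (sequence : String) (alphabet : List String) (ambiguous_map : List (String × List String)) :
    expand_sequence sequence alphabet ambiguous_map = expand_sequence_alt sequence alphabet ambiguous_map := by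
  unfold expand_sequence expand_sequence_alt
  rw [foldl_step_eq (fun char => altCharOptions char (PySem.Set.ofList alphabet) ambiguous_map)]
  simp [altCharOptions]

-- ===== VERDICT (by name: the statement is the Claim_ definition above) =====
theorem expand_sequence_spec : Claim_equal_expand_sequence := by
  intro sequence alphabet ambiguous_map _ _
  unfold Spec_expand_sequence
  exact expand_sequence_eq sequence alphabet ambiguous_map
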